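-- pv_equiv track=rewrite | github.com/ali414a44ali/p | Make/VeGa/plugins/play/STYLES.py | zakhrafa_text
-- ===== SOURCE A (Python) =====
-- def zakhrafa_text(text, style):
--     """تزيين النص بأسلوب معين"""
--     result = []
--     char_map = {}
--
--     # إنشاء خريطة للأحرف الكبيرة
--     for i in range(26):
--         char = chr(ord('A') + i)
--         if i < len(style):
--             char_map[char] = style[i]
--         else:
--             char_map[char] = char
--
--     # إنشاء خريطة للأحرف الصغيرة
--     for i in range(26):
--         char = chr(ord('a') + i)
--         if i < len(style):
--             # استخدام الأحرف الصغيرة المقابلة إن وجدت، وإلا استخدام الأحرف الكبيرة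
--             lower_char = style[i].lower() if style[i].lower() != style[i] else style[i]
--             char_map[char] = lower_char
--         else:
--             char_map[char] = char
--
--     # تحويل النص المدخل
--     for char in text:
--         if char in char_map:
--             result.append(char_map[char])
--         else:
--             result.append(char)
--
--     return ''.join(result)
-- ===== SOURCE B (Python) =====
-- def _styled_char(ch, style):
--     i = ord(ch) - ord('A')
--     if 0 <= i < 26 and i < len(style):
--         return style[i]
--     j = ord(ch) - ord('a')
--     if 0 <= j < 26 and j < len(style):
--         return style[j].lower()
--     return ch
--
-- def zakhrafa_text(text, style):
--     """تزيين النص بأسلوب معين"""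
--     return ''.join(_styled_char(ch, style) for ch in text)
-- ===== Notes on version B (the rewrite author's own statement) =====
-- stated objective: simpler
-- what changed: B drops the 52-entry char_map dict and its two build loops entirely: a single per-character function classifies each char arithmetically (ord offset from 'A'/'a') and indexes style directly, using that A's conditional lowercase expression always reduces to style[i].lower().
import Mathlib
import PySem

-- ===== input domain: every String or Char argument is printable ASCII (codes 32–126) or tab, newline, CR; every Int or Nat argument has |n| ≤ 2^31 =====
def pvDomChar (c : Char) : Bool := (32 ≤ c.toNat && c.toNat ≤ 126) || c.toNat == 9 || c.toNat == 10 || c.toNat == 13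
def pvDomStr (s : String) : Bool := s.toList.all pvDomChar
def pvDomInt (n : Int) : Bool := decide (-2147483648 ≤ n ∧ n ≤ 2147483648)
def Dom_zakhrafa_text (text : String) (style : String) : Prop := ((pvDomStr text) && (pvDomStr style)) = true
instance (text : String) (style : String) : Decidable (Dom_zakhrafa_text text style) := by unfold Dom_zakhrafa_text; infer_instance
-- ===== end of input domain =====

-- B replaces A's 52-entry char_map dict (two build loops + a lookup pass) by a single direct
-- per-character arithmetic classification; objective: simpler, same value on all inputs.

-- ===== PORT A =====
-- one iteration of A's first build loop: char = chr(ord('A')+i); style[i] if i < len(style) else char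
def zaUpperStep (s : List Char) (d : PySem.Dict Char Char) (i : Int) : PySem.Dict Char Char :=
  if i < (s.length : Int) then
    d.insert (Char.ofNat (65 + i.toNat)) (PySem.List.pyGetD s i (Char.ofNat (65 + i.toNat)))
  else
    d.insert (Char.ofNat (65 + i.toNat)) (Char.ofNat (65 + i.toNat))

-- one iteration of A's second build loop: char = chr(ord('a')+i);
-- lower_char = style[i].lower() if style[i].lower() != style[i] else style[i]
def zaLowerStep (s : List Char) (d : PySem.Dict Char Char) (i : Int) : PySem.Dict Char Char :=
  if i < (s.length : Int) then
    d.insert (Char.ofNat (97 + i.toNat))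
      (if PySem.Chars.lowerChar (PySem.List.pyGetD s i (Char.ofNat (97 + i.toNat)))
            ≠ PySem.List.pyGetD s i (Char.ofNat (97 + i.toNat))
       then PySem.Chars.lowerChar (PySem.List.pyGetD s i (Char.ofNat (97 + i.toNat)))
       else PySem.List.pyGetD s i (Char.ofNat (97 + i.toNat)))
  else
    d.insert (Char.ofNat (97 + i.toNat)) (Char.ofNat (97 + i.toNat))

def zakhrafa_text (text : String) (style : String) : String :=
  String.ofList
    (text.toList.foldl (fun res ch =>
      match ((PySem.List.pyRange 0 26 1).foldl (zaLowerStep style.toList)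
              ((PySem.List.pyRange 0 26 1).foldl (zaUpperStep style.toList) PySem.Dict.empty)).get? ch with
      | some v => res ++ [v]            -- char in char_map: append char_map[char]
      | none   => res ++ [ch]) [])      -- else: append char

-- ===== PORT B =====
def zbChar (s : List Char) (ch : Char) : Char :=
  if 0 ≤ (ch.toNat : Int) - 65 ∧ (ch.toNat : Int) - 65 < 26 ∧ (ch.toNat : Int) - 65 < (s.length : Int) then
    PySem.List.pyGetD s ((ch.toNat : Int) - 65) ch
  else if 0 ≤ (ch.toNat : Int) - 97 ∧ (ch.toNat : Int) - 97 < 26 ∧ (ch.toNat : Int) - 97 < (s.length : Int) then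
    PySem.Chars.lowerChar (PySem.List.pyGetD s ((ch.toNat : Int) - 97) ch)
  else ch

def zakhrafa_text_alt (text : String) (style : String) : String :=
  String.ofList (text.toList.map (zbChar style.toList))

-- ===== PRECONDITION & SPEC =====
def Spec_zakhrafa_text (text : String) (style : String) (out : String) : Prop := out = zakhrafa_text_alt text style
instance (text : String) (style : String) (out : String) : Decidable (Spec_zakhrafa_text text style out) := by unfold Spec_zakhrafa_text; infer_instance

-- ===== CLAIM (what is proved, stated in full; the proofs are below) =====
def Claim_equal_zakhrafa_text : Prop := ∀ (text : String) (style : String), Dom_zakhrafa_text text style → Spec_zakhrafa_text text style (zakhrafa_text text style)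

-- ===== LEMMAS AND PROOFS =====

lemma char_toNat_ofNat (n : Nat) (h : n < 55296) : (Char.ofNat n).toNat = n := by
  have hv : n.isValidChar := Or.inl h
  unfold Char.ofNat
  split
  · simp [Char.ofNatAux, Char.toNat]
  · exact absurd hv (by assumption)

lemma char_toNat_inj {c d : Char} (h : c.toNat = d.toNat) : c = d := by
  apply Char.ext
  exact UInt32.toNat_inj.mp h

lemma char_eq_ofNat_iff (c : Char) (n : Nat) (h : n < 55296) : c = Char.ofNat n ↔ c.toNat = n := by
  constructor
  · rintro rfl; exact char_toNat_ofNat n h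
  · intro hc; exact char_toNat_inj (by rw [hc, char_toNat_ofNat n h])

-- value char_map stores for an uppercase letter c (65 ≤ c.toNat < 91)
def zaUVal (s : List Char) (c : Char) : Char :=
  if (c.toNat : Int) - 65 < (s.length : Int) then PySem.List.pyGetD s ((c.toNat : Int) - 65) c else c

-- value char_map stores for a lowercase letter c (97 ≤ c.toNat < 123)
def zaLVal (s : List Char) (c : Char) : Char :=
  if (c.toNat : Int) - 97 < (s.length : Int) then PySem.Chars.lowerChar (PySem.List.pyGetD s ((c.toNat : Int) - 97) c) else c

lemma lower_cond_eq (v : Char) :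
    (if PySem.Chars.lowerChar v ≠ v then PySem.Chars.lowerChar v else v) = PySem.Chars.lowerChar v := by
  split_ifs with h
  · rfl
  · exact (not_not.mp h).symm

lemma zaUpper_get (s : List Char) : ∀ (k a : Nat), a + k = 26 →
    ∀ (d : PySem.Dict Char Char) (c : Char),
    ((PySem.List.pyRange (a : Int) 26 1).foldl (zaUpperStep s) d).get? c =
      if 65 + a ≤ c.toNat ∧ c.toNat < 91 then some (zaUVal s c) else d.get? c := by
  intro k
  induction k with
  | zero =>
    intro a ha d c
    rw [PySem.List.pyRange_one_eq_nil (by exact_mod_cast (by omega : (26:Int) ≤ a)), if_neg (by omega)]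
    rfl
  | succ k ih =>
    intro a ha d c
    rw [PySem.List.pyRange_one_cons (by exact_mod_cast (by omega : (a:Int) < 26)), List.foldl_cons,
        show ((a:Int) + 1) = ((a+1 : Nat) : Int) by push_cast; ring, ih (a+1) (by omega)]
    have htn : ((a:Int)).toNat = a := Int.toNat_natCast a
    have hKt : (Char.ofNat (65 + ((a:Int)).toNat)).toNat = 65 + a := by
      rw [htn]; exact char_toNat_ofNat _ (by omega)
    by_cases hc : 65 + (a+1) ≤ c.toNat ∧ c.toNat < 91
    · rw [if_pos hc, if_pos (by omega)]
    · rw [if_neg hc]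
      by_cases he : c.toNat = 65 + a
      · have hcK : c = Char.ofNat (65 + ((a:Int)).toNat) := by
          rw [htn]; exact (char_eq_ofNat_iff c _ (by omega)).mpr (by omega)
        rw [if_pos (show 65 + a ≤ c.toNat ∧ c.toNat < 91 by omega)]
        unfold zaUpperStep
        split
        · rename_i hlen
          rw [PySem.Dict.get?_insert, if_pos hcK, zaUVal,
              if_pos (show (c.toNat : Int) - 65 < (s.length : Int) by omega),
              show ((c.toNat : Int) - 65) = (a : Int) by omega, ← hcK]
        · rename_i hlen
          rw [PySem.Dict.get?_insert, if_pos hcK, zaUVal,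
              if_neg (show ¬ (c.toNat : Int) - 65 < (s.length : Int) by omega), ← hcK]
      · have hne : c ≠ Char.ofNat (65 + ((a:Int)).toNat) := fun hh => he (by rw [hh]; exact hKt)
        rw [if_neg (show ¬ (65 + a ≤ c.toNat ∧ c.toNat < 91) by omega)]
        unfold zaUpperStep
        split <;> rw [PySem.Dict.get?_insert, if_neg hne]

lemma zaLower_get (s : List Char) : ∀ (k a : Nat), a + k = 26 →
    ∀ (d : PySem.Dict Char Char) (c : Char),
    ((PySem.List.pyRange (a : Int) 26 1).foldl (zaLowerStep s) d).get? c =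
      if 97 + a ≤ c.toNat ∧ c.toNat < 123 then some (zaLVal s c) else d.get? c := by
  intro k
  induction k with
  | zero =>
    intro a ha d c
    rw [PySem.List.pyRange_one_eq_nil (by exact_mod_cast (by omega : (26:Int) ≤ a)), if_neg (by omega)]
    rfl
  | succ k ih =>
    intro a ha d c
    rw [PySem.List.pyRange_one_cons (by exact_mod_cast (by omega : (a:Int) < 26)), List.foldl_cons,
        show ((a:Int) + 1) = ((a+1 : Nat) : Int) by push_cast; ring, ih (a+1) (by omega)]
    have htn : ((a:Int)).toNat = a := Int.toNat_natCast a
    have hKt : (Char.ofNat (97 + ((a:Int)).toNat)).toNat = 97 + a := by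
      rw [htn]; exact char_toNat_ofNat _ (by omega)
    by_cases hc : 97 + (a+1) ≤ c.toNat ∧ c.toNat < 123
    · rw [if_pos hc, if_pos (by omega)]
    · rw [if_neg hc]
      by_cases he : c.toNat = 97 + a
      · have hcK : c = Char.ofNat (97 + ((a:Int)).toNat) := by
          rw [htn]; exact (char_eq_ofNat_iff c _ (by omega)).mpr (by omega)
        rw [if_pos (show 97 + a ≤ c.toNat ∧ c.toNat < 123 by omega)]
        unfold zaLowerStep
        split
        · rename_i hlen
          rw [PySem.Dict.get?_insert, if_pos hcK, lower_cond_eq, zaLVal,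
              if_pos (show (c.toNat : Int) - 97 < (s.length : Int) by omega),
              show ((c.toNat : Int) - 97) = (a : Int) by omega, ← hcK]
        · rename_i hlen
          rw [PySem.Dict.get?_insert, if_pos hcK, zaLVal,
              if_neg (show ¬ (c.toNat : Int) - 97 < (s.length : Int) by omega), ← hcK]
      · have hne : c ≠ Char.ofNat (97 + ((a:Int)).toNat) := fun hh => he (by rw [hh]; exact hKt)
        rw [if_neg (show ¬ (97 + a ≤ c.toNat ∧ c.toNat < 123) by omega)]
        unfold zaLowerStep
        split <;> rw [PySem.Dict.get?_insert, if_neg hne]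

lemma za_get (s : List Char) (c : Char) :
    ((PySem.List.pyRange 0 26 1).foldl (zaLowerStep s)
      ((PySem.List.pyRange 0 26 1).foldl (zaUpperStep s) PySem.Dict.empty)).get? c =
      if 97 ≤ c.toNat ∧ c.toNat < 123 then some (zaLVal s c)
      else if 65 ≤ c.toNat ∧ c.toNat < 91 then some (zaUVal s c)
      else none := by
  have h0 : ((0:Nat) : Int) = (0 : Int) := rfl
  have hl := zaLower_get s 26 0 rfl ((PySem.List.pyRange 0 26 1).foldl (zaUpperStep s) PySem.Dict.empty) c
  have hu := zaUpper_get s 26 0 rfl PySem.Dict.empty c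
  rw [h0] at hl hu
  rw [hl, hu]
  simp [PySem.Dict.get?_empty]

lemma za_char (s : List Char) (c : Char) :
    (match ((PySem.List.pyRange 0 26 1).foldl (zaLowerStep s)
      ((PySem.List.pyRange 0 26 1).foldl (zaUpperStep s) PySem.Dict.empty)).get? c with
     | some v => v | none => c) = zbChar s c := by
  rw [za_get]
  unfold zbChar zaUVal zaLVal
  split_ifs <;> first | rfl | omega

lemma foldl_match_append (h : Char → Option Char) : ∀ (l : List Char) (acc : List Char),
    l.foldl (fun res ch => match h ch with | some v => res ++ [v] | none => res ++ [ch]) acc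
      = acc ++ l.map (fun ch => match h ch with | some v => v | none => ch) := by
  intro l
  induction l with
  | nil => simp
  | cons x xs ih =>
    intro acc
    simp only [List.foldl_cons, List.map_cons, ih]
    cases h x <;> simp

-- ===== VERDICT (by name: the statement is the Claim_ definition above) =====
theorem zakhrafa_text_spec : Claim_equal_zakhrafa_text := by
  intro text style _
  unfold Spec_zakhrafa_text zakhrafa_text zakhrafa_text_alt
  rw [foldl_match_append]
  simp only [List.nil_append]
  congr 1
  exact List.map_congr_left (fun c _ => za_char style.toList c)
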